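-- pv_equiv track=rewrite | github.com/Aries99C/constraint-cleaning | constraints/rfd/IsCover.py | get_full_or
-- ===== SOURCE A (Python) =====
-- def my_or(x, y):
--     z = []
--     for i in range(len(x)):
--         if x[i] == 1 or y[i] == 1:
--             z.append(1)
--         else:
--             z.append(0)
--     return z
--
-- def get_full_or(op, RHS):
--     res = [[0] * len(op[0])] * (len(op) + 1)
--     for i in range(len(op) - 1, -1, -1):
--         if i == RHS:
--             res[i] = res[i + 1]
--             continue
--         res[i] = my_or(res[i + 1], op[i])
--     return res
-- ===== SOURCE B (Python) =====
-- def get_full_or(op, RHS):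
--     n = len(op)
--     m = len(op[0])
--     last = [-1] * m
--     for k in range(n):
--         if k == RHS:
--             continue
--         row = op[k]
--         for j in range(m):
--             if row[j] == 1:
--                 last[j] = k
--     return [[1 if last[j] >= i else 0 for j in range(m)] for i in range(n + 1)]
-- ===== Notes on version B (the rewrite author's own statement) =====
-- stated objective: alternative
-- what changed: Replaces the bottom-up incremental OR accumulation of suffix rows by a single per-column pass that records the last 1-carrying row index (skipping RHS) and then emits each of the n+1 rows by thresholding that index table.
-- outside the precondition, e.g. on get_full_or([[0, 0], [1], [1, 1]], 5): A returns [[1, 1], [1, 1], [1, 1], [0, 0]], B raises IndexError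
import Mathlib
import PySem

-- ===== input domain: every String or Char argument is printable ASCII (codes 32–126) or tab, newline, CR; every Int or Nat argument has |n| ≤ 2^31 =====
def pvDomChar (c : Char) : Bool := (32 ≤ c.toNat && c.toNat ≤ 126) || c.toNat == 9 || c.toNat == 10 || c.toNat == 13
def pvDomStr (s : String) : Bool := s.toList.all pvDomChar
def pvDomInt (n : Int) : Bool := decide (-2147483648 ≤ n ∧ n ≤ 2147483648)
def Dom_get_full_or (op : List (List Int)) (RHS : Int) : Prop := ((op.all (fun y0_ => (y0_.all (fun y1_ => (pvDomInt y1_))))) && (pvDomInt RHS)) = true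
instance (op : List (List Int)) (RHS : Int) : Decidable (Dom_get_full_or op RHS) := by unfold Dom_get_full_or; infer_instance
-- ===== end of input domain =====

-- B replaces A's bottom-up incremental OR accumulation by a per-column last-1-index table
-- followed by a threshold pass (alternative decomposition, same cost).

-- ===== PORT A =====
-- my_or: builds z by appending 1/0 per position of x (y read with pyGetD; in range under Pre_).
def myOr (x y : List Int) : List Int :=
  (PySem.List.pyRange 0 (x.length : Int) 1).foldl
    (fun z i =>
      if PySem.List.pyGetD x i 0 == 1 || PySem.List.pyGetD y i 0 == 1 then z ++ [1] else z ++ [0])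
    []

-- literal port of A: res initialised to (n+1) zero rows, then the countdown loop mutates res[i].
def get_full_or (op : List (List Int)) (RHS : Int) : List (List Int) :=
  let res0 := List.replicate (op.length + 1) (List.replicate (op.headD []).length (0 : Int))
  (PySem.List.pyRange ((op.length : Int) - 1) (-1) (-1)).foldl
    (fun res i =>
      if i == RHS then PySem.List.pySetD res i (PySem.List.pyGetD res (i + 1) [])
      else PySem.List.pySetD res i (myOr (PySem.List.pyGetD res (i + 1) []) (PySem.List.pyGetD op i [])))
    res0

-- ===== PORT B =====
-- port of Source B: build last[j] = last row index k ≠ RHS with op[k][j] == 1 (else -1), then threshold.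
def get_full_or_alt (op : List (List Int)) (RHS : Int) : List (List Int) :=
  let n := op.length
  let m := (op.headD []).length
  let last :=
    (PySem.List.pyRange 0 (n : Int) 1).foldl
      (fun last k =>
        if k == RHS then last
        else
          let row := PySem.List.pyGetD op k []
          (PySem.List.pyRange 0 (m : Int) 1).foldl
            (fun last j => if PySem.List.pyGetD row j 0 == 1 then PySem.List.pySetD last j k else last)
            last)
      (List.replicate m (-1 : Int))
  (PySem.List.pyRange 0 ((n : Int) + 1) 1).map
    (fun i => (PySem.List.pyRange 0 (m : Int) 1).map
      (fun j => if PySem.List.pyGetD last j (-1) ≥ i then (1 : Int) else 0))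

-- ===== PRECONDITION & SPEC =====
-- Pre_ excludes the empty op (A raises IndexError on op[0]) and ragged inputs where some row
-- k ≠ RHS is shorter than row 0: there A's my_or indexes past the short row and raises
-- IndexError unless the accumulated OR happens to short-circuit; on the rare ragged inputs
-- where short-circuiting lets A return (see cites), B raises.
def Pre_get_full_or (op : List (List Int)) (RHS : Int) : Prop :=
  op ≠ [] ∧ ∀ p ∈ op.zipIdx, ((p.2 : Int) = RHS ∨ (op.headD []).length ≤ p.1.length)
instance (op : List (List Int)) (RHS : Int) : Decidable (Pre_get_full_or op RHS) := by
  unfold Pre_get_full_or; infer_instance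
def pvWitness_get_full_or : List (List Int) × Int := ([[1, 0], [0, 1]], 1)

def Spec_get_full_or (op : List (List Int)) (RHS : Int) (out : List (List Int)) : Prop := out = get_full_or_alt op RHS
instance (op : List (List Int)) (RHS : Int) (out : List (List Int)) : Decidable (Spec_get_full_or op RHS out) := by unfold Spec_get_full_or; infer_instance

-- ===== CLAIM (what is proved, stated in full; the proofs are below) =====
def Claim_equal_get_full_or : Prop := ∀ (op : List (List Int)) (RHS : Int), Dom_get_full_or op RHS → Pre_get_full_or op RHS → Spec_get_full_or op RHS (get_full_or op RHS)

-- ===== LEMMAS AND PROOFS =====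

-- hitU op RHS K i j: some row k < K with k ≠ RHS, i ≤ k and op[k][j] == 1
def hitU (op : List (List Int)) (RHS : Int) (K i j : Nat) : Bool :=
  (List.range K).any (fun k => decide (i ≤ k) && decide ((k : Int) ≠ RHS) && ((op.getD k []).getD j 0 == 1))

def cfRow (op : List (List Int)) (RHS : Int) (i : Nat) : List Int :=
  (List.range (op.headD []).length).map (fun j => if hitU op RHS op.length i j then (1 : Int) else 0)

def target (op : List (List Int)) (RHS : Int) : List (List Int) :=
  (List.range (op.length + 1)).map (fun i => cfRow op RHS i)

theorem hitU_succ (op : List (List Int)) (RHS : Int) (K i j : Nat) :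
    hitU op RHS (K + 1) i j =
      (hitU op RHS K i j || (decide (i ≤ K) && decide ((K : Int) ≠ RHS) && ((op.getD K []).getD j 0 == 1))) := by
  simp [hitU, List.range_succ]

theorem hitU_zero (op : List (List Int)) (RHS : Int) (i j : Nat) : hitU op RHS 0 i j = false := by
  simp [hitU]

-- hitU from row i equals hitU from row i+1 plus a possible hit at row i itself
theorem hitU_self (op : List (List Int)) (RHS : Int) (K i j : Nat) :
    hitU op RHS K i j =
      (hitU op RHS K (i + 1) j || (decide (i < K) && decide ((i : Int) ≠ RHS) && ((op.getD i []).getD j 0 == 1))) := by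
  rw [Bool.eq_iff_iff]
  simp only [hitU, List.any_eq_true, List.mem_range, Bool.and_eq_true, decide_eq_true_eq,
    beq_iff_eq, Bool.or_eq_true]
  constructor
  · rintro ⟨k, hk, ⟨hik, hne⟩, hv⟩
    by_cases hki : k = i
    · subst hki; exact Or.inr ⟨⟨hk, hne⟩, hv⟩
    · exact Or.inl ⟨k, hk, ⟨by omega, hne⟩, hv⟩
  · rintro (⟨k, hk, ⟨hik, hne⟩, hv⟩ | ⟨⟨hk, hne⟩, hv⟩)
    · exact ⟨k, hk, ⟨by omega, hne⟩, hv⟩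
    · exact ⟨i, hk, ⟨le_refl i, hne⟩, hv⟩

-- hitU at the skipped row: row RHS contributes nothing
theorem hitU_at_RHS (op : List (List Int)) (RHS : Int) (K i j : Nat) (h : (i : Int) = RHS) :
    hitU op RHS K i j = hitU op RHS K (i + 1) j := by
  rw [hitU_self op RHS K i j]; simp [h]

theorem hitU_top (op : List (List Int)) (RHS : Int) (K j : Nat) : hitU op RHS K K j = false := by
  simp only [hitU, List.any_eq_false, List.mem_range]
  intro k hk
  simp [show ¬ K ≤ k from by omega]

-- cfRow at the top is the zero row
theorem cfRow_top (op : List (List Int)) (RHS : Int) :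
    cfRow op RHS op.length = List.replicate (op.headD []).length 0 := by
  unfold cfRow
  rw [List.eq_replicate_iff]
  refine ⟨by simp, ?_⟩
  intro b hb
  simp only [List.mem_map, List.mem_range] at hb
  obtain ⟨j, _, hj⟩ := hb
  rw [hitU_top] at hj
  simpa using hj.symm

-- cfRow at the skipped row equals the row above it
theorem cfRow_at_RHS (op : List (List Int)) (RHS : Int) (I : Nat) (h : (I : Int) = RHS) :
    cfRow op RHS I = cfRow op RHS (I + 1) := by
  unfold cfRow
  refine List.map_congr_left ?_
  intro j _
  rw [hitU_at_RHS op RHS op.length I j h]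

-- ===== A side =====

theorem myOr_spec (x y : List Int) :
    myOr x y = (List.range x.length).map
      (fun i => if x.getD i 0 == 1 || y.getD i 0 == 1 then (1 : Int) else 0) := by
  unfold myOr
  rw [PySem.List.pyRange_zero_natCast, List.foldl_map]
  have h : (fun (z : List Int) (k : Nat) =>
      if PySem.List.pyGetD x (↑k) 0 == 1 || PySem.List.pyGetD y (↑k) 0 == 1 then z ++ [1] else z ++ [0])
      = fun z k => z ++ [if x.getD k 0 == 1 || y.getD k 0 == 1 then (1 : Int) else 0] := by
    funext z k
    simp only [PySem.List.pyGetD_natCast]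
    split <;> rfl
  rw [h, PySem.List.foldl_append_singleton_eq_map]
  simp

def stateA (op : List (List Int)) (RHS : Int) (I : Nat) : List (List Int) :=
  (List.range (op.length + 1)).map
    (fun idx => if I ≤ idx then cfRow op RHS idx else List.replicate (op.headD []).length 0)

theorem stateA_zero (op : List (List Int)) (RHS : Int) : stateA op RHS 0 = target op RHS := by
  simp [stateA, target]

theorem stateA_top (op : List (List Int)) (RHS : Int) :
    stateA op RHS op.length = List.replicate (op.length + 1) (List.replicate (op.headD []).length 0) := by
  unfold stateA
  have h : ∀ idx ∈ List.range (op.length + 1),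
      (if op.length ≤ idx then cfRow op RHS idx else List.replicate (op.headD []).length (0 : Int))
        = List.replicate (op.headD []).length (0 : Int) := by
    intro idx hidx
    rw [List.mem_range] at hidx
    by_cases hi : op.length ≤ idx
    · have : idx = op.length := by omega
      simp [this, cfRow_top]
    · simp [hi]
  rw [List.map_congr_left h]
  simp [List.map_const']

-- the loop body at index I < op.length sends stateA (I+1) to stateA I
theorem stateA_get (op : List (List Int)) (RHS : Int) (I : Nat) (hI : I < op.length) :
    PySem.List.pyGetD (stateA op RHS (I + 1)) ((I : Int) + 1) [] = cfRow op RHS (I + 1) := by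
  rw [show ((I : Int) + 1) = ((I + 1 : Nat) : Int) by push_cast; ring, PySem.List.pyGetD_natCast]
  unfold stateA
  have h2 : I + 1 < op.length + 1 := by omega
  simp [List.getD, h2]

theorem stateA_set (op : List (List Int)) (RHS : Int) (I : Nat) (_hI : I < op.length) :
    (stateA op RHS (I + 1)).set I (cfRow op RHS I) = stateA op RHS I := by
  apply List.ext_getElem
  · simp [stateA]
  · intro t h1 h2
    simp only [stateA, List.getElem_set, List.getElem_map, List.getElem_range]
    by_cases hIt : I = t
    · simp [hIt]
    · have : (I + 1 ≤ t) ↔ (I ≤ t) := by omega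
      simp [hIt, this]

theorem myOr_step (op : List (List Int)) (RHS : Int) (I : Nat) (hI : I < op.length)
    (hne : ¬ ((I : Int) = RHS)) :
    myOr (cfRow op RHS (I + 1)) (PySem.List.pyGetD op (I : Int) []) = cfRow op RHS I := by
  rw [myOr_spec, PySem.List.pyGetD_natCast]
  have hlen : (cfRow op RHS (I + 1)).length = (op.headD []).length := by simp [cfRow]
  rw [hlen]
  unfold cfRow
  refine List.map_congr_left ?_
  intro j hj
  rw [List.mem_range] at hj
  have hget : (List.map (fun j => if hitU op RHS op.length (I + 1) j = true then (1 : Int) else 0)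
      (List.range (op.headD []).length)).getD j 0
      = if hitU op RHS op.length (I + 1) j = true then (1 : Int) else 0 :=
    PySem.List.getD_map_range _ _ _ _ hj
  rw [hget, hitU_self op RHS op.length I j]
  by_cases ha : hitU op RHS op.length (I + 1) j = true <;>
    by_cases hb : ((op.getD I []).getD j 0 = 1) <;>
      simp [ha, hI, hne]

theorem stateA_step (op : List (List Int)) (RHS : Int) (I : Nat) (hI : I < op.length) :
    (if (I : Int) == RHS then
        PySem.List.pySetD (stateA op RHS (I + 1)) (I : Int)
          (PySem.List.pyGetD (stateA op RHS (I + 1)) ((I : Int) + 1) [])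
      else
        PySem.List.pySetD (stateA op RHS (I + 1)) (I : Int)
          (myOr (PySem.List.pyGetD (stateA op RHS (I + 1)) ((I : Int) + 1) [])
            (PySem.List.pyGetD op (I : Int) []))) = stateA op RHS I := by
  rw [stateA_get op RHS I hI]
  simp only [PySem.List.pySetD_natCast]
  by_cases h : (I : Int) = RHS
  · simp only [h, beq_self_eq_true, if_true]
    rw [← cfRow_at_RHS op RHS I h]
    exact stateA_set op RHS I hI
  · simp only [beq_iff_eq, h, if_false]
    rw [myOr_step op RHS I hI h]
    exact stateA_set op RHS I hI

theorem loopA (op : List (List Int)) (RHS : Int) : ∀ I, I ≤ op.length →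
    (PySem.List.pyRange ((I : Int) - 1) (-1) (-1)).foldl
      (fun res i =>
        if i == RHS then PySem.List.pySetD res i (PySem.List.pyGetD res (i + 1) [])
        else PySem.List.pySetD res i
          (myOr (PySem.List.pyGetD res (i + 1) []) (PySem.List.pyGetD op i [])))
      (stateA op RHS I) = stateA op RHS 0 := by
  intro I
  induction I with
  | zero =>
    intro _
    rw [show ((0 : Nat) : Int) - 1 = -1 by norm_num, PySem.List.pyRange_neg_one_eq_nil (by norm_num)]
    rfl
  | succ I ih =>
    intro h
    rw [show ((I + 1 : Nat) : Int) - 1 = (I : Int) by push_cast; ring,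
      PySem.List.pyRange_neg_one_cons (by omega : (-1 : Int) < (I : Int)),
      List.foldl_cons, stateA_step op RHS I (by omega)]
    exact ih (by omega)

theorem portA_eq_target (op : List (List Int)) (RHS : Int) : get_full_or op RHS = target op RHS := by
  unfold get_full_or
  rw [← stateA_top op RHS, ← stateA_zero op RHS]
  exact loopA op RHS op.length le_rfl

-- ===== B side =====

theorem hitU_ge (op : List (List Int)) (RHS : Int) (K i j : Nat) (h : K ≤ i) :
    hitU op RHS K i j = false := by
  simp only [hitU, List.any_eq_false, List.mem_range]
  intro k hk
  simp [show ¬ i ≤ k from by omega]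

theorem getD_set_self (l : List Int) (i : Nat) (v d : Int) (h : i < l.length) :
    (l.set i v).getD i d = v := by
  simp [List.getD, h]

theorem getD_set_other (l : List Int) (i j : Nat) (v d : Int) (h : i ≠ j) :
    (l.set i v).getD j d = l.getD j d := by
  simp [List.getD, h]

-- the inner row scan: a conditional set at each column j < m
theorem innerB (row : List Int) (K : Nat) :
    ∀ (m : Nat) (last : List Int), m ≤ last.length →
      (((List.range m).foldl (fun l j => if row.getD j 0 = 1 then l.set j (K : Int) else l) last).length
          = last.length ∧
       ∀ j' (d : Int),
         ((List.range m).foldl (fun l j => if row.getD j 0 = 1 then l.set j (K : Int) else l) last).getD j' d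
           = if j' < m ∧ row.getD j' 0 = 1 then (K : Int) else last.getD j' d) := by
  intro m
  induction m with
  | zero =>
    intro last _
    simp
  | succ m ih =>
    intro last h
    obtain ⟨ihlen, ihget⟩ := ih last (by omega)
    rw [List.range_succ, List.foldl_append, List.foldl_cons, List.foldl_nil]
    by_cases hb : row.getD m 0 = 1
    · rw [if_pos hb]
      refine ⟨by rw [List.length_set, ihlen], ?_⟩
      intro j' d
      by_cases hjm : m = j'
      · subst hjm
        have hmlt : m < ((List.range m).foldl
            (fun l j => if row.getD j 0 = 1 then l.set j (K : Int) else l) last).length := by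
          rw [ihlen]; omega
        rw [getD_set_self _ _ _ _ hmlt, if_pos ⟨by omega, hb⟩]
      · have e1 : ((j' < m + 1) ∧ row.getD j' 0 = 1) ↔ ((j' < m) ∧ row.getD j' 0 = 1) := by
          constructor
          · rintro ⟨h1, h2⟩
            refine ⟨?_, h2⟩
            rcases Nat.lt_succ_iff_lt_or_eq.mp h1 with hc | hc
            · exact hc
            · exact absurd hc.symm hjm
          · rintro ⟨h1, h2⟩; exact ⟨by omega, h2⟩
        rw [getD_set_other _ _ _ _ _ hjm, ihget j' d]
        exact (if_congr e1 rfl rfl).symm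
    · rw [if_neg hb]
      refine ⟨ihlen, ?_⟩
      intro j' d
      rw [ihget j' d]
      have e1 : ((j' < m + 1) ∧ row.getD j' 0 = 1) ↔ ((j' < m) ∧ row.getD j' 0 = 1) := by
        constructor
        · rintro ⟨h1, h2⟩
          refine ⟨?_, h2⟩
          rcases Nat.lt_succ_iff_lt_or_eq.mp h1 with hc | hc
          · exact hc
          · subst hc; exact absurd h2 hb
        · rintro ⟨h1, h2⟩; exact ⟨by omega, h2⟩
      exact (if_congr e1 rfl rfl).symm

-- the outer row scan: last[j] ≥ i iff some row k < K, k ≠ RHS, has op[k][j] == 1 with i ≤ k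
theorem loopB (op : List (List Int)) (RHS : Int) (m : Nat) :
    ∀ K : Nat,
      (((List.range K).foldl
          (fun (last : List Int) (k : Nat) =>
            if (k : Int) = RHS then last
            else (List.range m).foldl
              (fun l j => if (op.getD k []).getD j 0 = 1 then l.set j (k : Int) else l) last)
          (List.replicate m (-1 : Int))).length = m ∧
       ∀ j < m, ∀ i : Nat,
         ((i : Int) ≤ ((List.range K).foldl
            (fun (last : List Int) (k : Nat) =>
              if (k : Int) = RHS then last
              else (List.range m).foldl
                (fun l j => if (op.getD k []).getD j 0 = 1 then l.set j (k : Int) else l) last)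
            (List.replicate m (-1 : Int))).getD j (-1)) ↔ hitU op RHS K i j = true) := by
  intro K
  induction K with
  | zero =>
    refine ⟨by simp, ?_⟩
    intro j hj i
    rw [hitU_zero]
    have hr : (List.replicate m (-1 : Int)).getD j (-1) = -1 := by
      simp [List.getD, hj]
    rw [List.range_zero, List.foldl_nil, hr]
    simp only [Bool.false_eq_true, iff_false]
    omega
  | succ K ih =>
    obtain ⟨ihlen, ihget⟩ := ih
    rw [List.range_succ, List.foldl_append, List.foldl_cons, List.foldl_nil]
    by_cases hk : (K : Int) = RHS
    · rw [if_pos hk]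
      refine ⟨ihlen, ?_⟩
      intro j hj i
      rw [ihget j hj i, hitU_succ]
      simp [hk]
    · rw [if_neg hk]
      obtain ⟨len2, get2⟩ := innerB (op.getD K []) K m _ (le_of_eq ihlen.symm)
      refine ⟨by rw [len2, ihlen], ?_⟩
      intro j hj i
      rw [get2 j (-1), hitU_succ]
      by_cases hb : (op.getD K []).getD j 0 = 1
      · rw [if_pos ⟨hj, hb⟩]
        by_cases hiK : i ≤ K
        · have h1 : (i : Int) ≤ (K : Int) := by exact_mod_cast hiK
          have hb' : (op[K]?.getD [])[j]?.getD 0 = 1 := hb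
          have hdec : (decide (i ≤ K) && decide ((K : Int) ≠ RHS) && ((op.getD K []).getD j 0 == 1)) = true := by
            simp [hiK, hk, hb']
          rw [hdec]
          simp [h1]
        · have h1 : ¬ ((i : Int) ≤ (K : Int)) := by exact_mod_cast hiK
          have h2 : hitU op RHS K i j = false := hitU_ge op RHS K i j (by omega)
          have hdec : (decide (i ≤ K) && decide ((K : Int) ≠ RHS) && ((op.getD K []).getD j 0 == 1)) = false := by
            simp [hiK]
          rw [hdec, h2]
          simp [h1]
      · have hb' : ¬ (op[K]?.getD [])[j]?.getD 0 = 1 := hb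
        have hdec : ((op.getD K []).getD j 0 == 1) = false := by simp [hb']
        rw [if_neg (fun hc => hb hc.2), ihget j hj i, hdec]
        simp

theorem portB_eq_target (op : List (List Int)) (RHS : Int) : get_full_or_alt op RHS = target op RHS := by
  unfold get_full_or_alt
  simp only [← Nat.cast_add_one, PySem.List.pyRange_zero_natCast, List.map_map, List.foldl_map,
    PySem.List.pyGetD_natCast, PySem.List.pySetD_natCast, beq_iff_eq]
  obtain ⟨hlen, hget⟩ := loopB op RHS (op.headD []).length op.length
  unfold target cfRow
  refine List.map_congr_left ?_
  intro i hi
  rw [List.mem_range] at hi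
  refine List.map_congr_left ?_
  intro j hj
  rw [List.mem_range] at hj
  have hiff := hget j hj i
  simp only [Function.comp_apply, PySem.List.pyGetD_natCast]
  simp only [hiff]

-- ===== VERDICT (by name: the statement is the Claim_ definition above) =====
theorem get_full_or_spec : Claim_equal_get_full_or := by
  intro op RHS _ _
  unfold Spec_get_full_or
  rw [portA_eq_target, portB_eq_target]
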